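-- pv_equiv track=rewrite | github.com/naaaani/cup | cup.py | render_graph
-- ===== SOURCE A (Python) =====
-- from math import floor
--
-- def quote(value):
--     value = str(value)
--     value = "\"" + value + "\""
--     return value
--
-- def render_graph(game_result):
--
--     r = "digraph {\n"
--     r += "rankdir = LR;\n"
--     r += "edge [arrowhead=none];\n"
--     r += "node [shape=box];\n\n"
--
--     for ri in range(len(game_result)):
--         round_data = game_result[ri]
--
--         r += render_graph_node(round_data, ri)
--         r += render_graph_ranks(round_data, ri)
--         r += render_graph_edges(round_data, ri)
--         r += "\n"
--
--     r += '}'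
--
--     return r
--
-- def render_graph_node(round_data, ri):
--
--     r = ""
--     for pi in range(len(round_data)):
--         player_data = round_data[pi]
--         if player_data is None:
--             continue
--         r += mk_node_id(ri, pi)
--         r += " ["
--         r += "label = " + quote(player_data)
--         r += "];"
--         r += "\n"
--
--     return r
--
-- def render_graph_ranks(round_data, ri):
--
--     r = "{rank = same;"
--     for pi in range(len(round_data)):
--         player_data = round_data[pi]
--         if player_data is None:
--             continue
--         r += mk_node_id(ri, pi)
--         r += ";"
--     r += "}\n"
--
--     return r
--
-- def render_graph_edges(round_data, ri):
--
--     r = ""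
--
--     if len(round_data) != 1:
--         for pi in range(len(round_data)):
--             player_data = round_data[pi]
--             if player_data is None:
--                 continue
--             r += mk_node_id(ri, pi)
--             r += " -> "
--             r += mk_node_id(ri + 1, floor(pi / 2))
--             r += "\n"
--
--     r += "\n"
--
--     return r
--
-- def mk_node_id(round_ix, player_ix):
--     node_id = "r" + str(round_ix) + "p" + str(player_ix)
--     return node_id
-- ===== SOURCE B (Python) =====
-- def mk_node_id(round_ix, player_ix):
--     return "r" + str(round_ix) + "p" + str(player_ix)
--
-- def render_graph(game_result):
--     r = "digraph {\nrankdir = LR;\nedge [arrowhead=none];\nnode [shape=box];\n\n"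
--     for ri, round_data in enumerate(game_result):
--         nodes = ""
--         ranks = ""
--         edges = ""
--         for pi, player_data in enumerate(round_data):
--             if player_data is None:
--                 continue
--             nid = mk_node_id(ri, pi)
--             nodes += nid + " [label = \"" + player_data + "\"];\n"
--             ranks += nid + ";"
--             edges += nid + " -> " + mk_node_id(ri + 1, pi // 2) + "\n"
--         r += nodes
--         r += "{rank = same;" + ranks + "}\n"
--         if len(round_data) != 1:
--             r += edges
--         r += "\n\n"
--     return r + "}"
-- ===== Notes on version B (the rewrite author's own statement) =====
-- stated objective: simpler
-- what changed: Replaces A's three separate helper scans per round (nodes, ranks, edges) with a single loop per round that builds the three string accumulators in one pass and assembles the round's block afterwards; measured constant-factor speedup from one pass and fewer string concatenations.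
import Mathlib
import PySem

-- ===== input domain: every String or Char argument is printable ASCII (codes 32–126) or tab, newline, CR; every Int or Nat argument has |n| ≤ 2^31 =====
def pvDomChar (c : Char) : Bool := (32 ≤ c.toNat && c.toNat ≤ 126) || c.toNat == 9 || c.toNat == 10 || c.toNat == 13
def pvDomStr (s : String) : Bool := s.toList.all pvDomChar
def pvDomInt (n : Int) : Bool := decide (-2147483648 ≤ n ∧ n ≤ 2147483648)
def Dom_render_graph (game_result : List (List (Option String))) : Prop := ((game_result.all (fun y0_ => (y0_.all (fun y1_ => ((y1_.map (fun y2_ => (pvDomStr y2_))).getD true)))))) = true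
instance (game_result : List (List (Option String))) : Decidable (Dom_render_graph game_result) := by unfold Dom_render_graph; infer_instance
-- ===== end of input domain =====

-- B merges A's three per-round helper scans into one loop building three accumulators (objective: simpler).

-- ===== PORT A =====
def pyQuote (value : String) : String := "\"" ++ value ++ "\""

def mk_node_id (round_ix player_ix : Int) : String :=
  "r" ++ PySem.Int.toStr round_ix ++ "p" ++ PySem.Int.toStr player_ix

def render_graph_node_loop (round_data : List (Option String)) (ri pi : Int) : String :=
  match round_data with
  | [] => ""
  | none :: rest => render_graph_node_loop rest ri (pi + 1)
  | some p :: rest =>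
      mk_node_id ri pi ++ " [" ++ "label = " ++ pyQuote p ++ "];" ++ "\n" ++
        render_graph_node_loop rest ri (pi + 1)

def render_graph_node (round_data : List (Option String)) (ri : Int) : String :=
  render_graph_node_loop round_data ri 0

def render_graph_ranks_loop (round_data : List (Option String)) (ri pi : Int) : String :=
  match round_data with
  | [] => ""
  | none :: rest => render_graph_ranks_loop rest ri (pi + 1)
  | some _ :: rest => mk_node_id ri pi ++ ";" ++ render_graph_ranks_loop rest ri (pi + 1)

def render_graph_ranks (round_data : List (Option String)) (ri : Int) : String :=
  "{rank = same;" ++ render_graph_ranks_loop round_data ri 0 ++ "}\n"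

def render_graph_edges_loop (round_data : List (Option String)) (ri pi : Int) : String :=
  match round_data with
  | [] => ""
  | none :: rest => render_graph_edges_loop rest ri (pi + 1)
  | some _ :: rest =>
      mk_node_id ri pi ++ " -> " ++ mk_node_id (ri + 1) (PySem.Int.floordiv pi 2) ++ "\n" ++
        render_graph_edges_loop rest ri (pi + 1)

def render_graph_edges (round_data : List (Option String)) (ri : Int) : String :=
  (if round_data.length ≠ 1 then render_graph_edges_loop round_data ri 0 else "") ++ "\n"

def render_graph_rounds (game_result : List (List (Option String))) (ri : Int) : String :=
  match game_result with
  | [] => ""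
  | round_data :: rest =>
      render_graph_node round_data ri ++ render_graph_ranks round_data ri ++
        render_graph_edges round_data ri ++ "\n" ++ render_graph_rounds rest (ri + 1)

def render_graph (game_result : List (List (Option String))) : String :=
  "digraph {\n" ++ "rankdir = LR;\n" ++ "edge [arrowhead=none];\n" ++ "node [shape=box];\n\n" ++
    render_graph_rounds game_result 0 ++ "}"

-- ===== PORT B =====
def altPlayerLoop (round_data : List (Option String)) (ri pi : Int) : String × String × String :=
  match round_data with
  | [] => ("", "", "")
  | none :: rest => altPlayerLoop rest ri (pi + 1)
  | some p :: rest =>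
      let nid := "r" ++ PySem.Int.toStr ri ++ "p" ++ PySem.Int.toStr pi
      let tgt := "r" ++ PySem.Int.toStr (ri + 1) ++ "p" ++ PySem.Int.toStr (PySem.Int.floordiv pi 2)
      let (ns, rs, es) := altPlayerLoop rest ri (pi + 1)
      (nid ++ " [label = \"" ++ p ++ "\"];\n" ++ ns,
       nid ++ ";" ++ rs,
       nid ++ " -> " ++ tgt ++ "\n" ++ es)

def altRoundLoop (game_result : List (List (Option String))) (ri : Int) : String :=
  match game_result with
  | [] => ""
  | round_data :: rest =>
      let (nodes, ranks, edges) := altPlayerLoop round_data ri 0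
      nodes ++ "{rank = same;" ++ ranks ++ "}\n" ++
        (if round_data.length ≠ 1 then edges else "") ++ "\n\n" ++
        altRoundLoop rest (ri + 1)

def render_graph_alt (game_result : List (List (Option String))) : String :=
  "digraph {\nrankdir = LR;\nedge [arrowhead=none];\nnode [shape=box];\n\n" ++
    altRoundLoop game_result 0 ++ "}"

-- ===== PRECONDITION & SPEC =====
def Spec_render_graph (game_result : List (List (Option String))) (out : String) : Prop := out = render_graph_alt game_result
instance (game_result : List (List (Option String))) (out : String) : Decidable (Spec_render_graph game_result out) := by unfold Spec_render_graph; infer_instance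

-- ===== CLAIM (what is proved, stated in full; the proofs are below) =====
def Claim_equal_render_graph : Prop := ∀ (game_result : List (List (Option String))), Dom_render_graph game_result → Spec_render_graph game_result (render_graph game_result)

-- ===== LEMMAS AND PROOFS =====
theorem altPlayerLoop_eq (round_data : List (Option String)) (ri pi : Int) :
    altPlayerLoop round_data ri pi =
      (render_graph_node_loop round_data ri pi,
       render_graph_ranks_loop round_data ri pi,
       render_graph_edges_loop round_data ri pi) := by
  induction round_data generalizing pi with
  | nil => rfl
  | cons hd tl ih =>
      cases hd with
      | none => simp [altPlayerLoop, render_graph_node_loop, render_graph_ranks_loop,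
          render_graph_edges_loop, ih]
      | some p =>
          simp [altPlayerLoop, render_graph_node_loop, render_graph_ranks_loop,
            render_graph_edges_loop, ih, mk_node_id, pyQuote, String.append_assoc]
          conv_rhs => rw [← String.append_assoc]
          rfl

theorem altRoundLoop_eq (game_result : List (List (Option String))) (ri : Int) :
    altRoundLoop game_result ri = render_graph_rounds game_result ri := by
  induction game_result generalizing ri with
  | nil => rfl
  | cons rd rest ih =>
      simp only [altRoundLoop, render_graph_rounds, altPlayerLoop_eq, ih,
        render_graph_node, render_graph_ranks, render_graph_edges]
      have hN : ("\n\n" : String) = "\n" ++ "\n" := rfl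
      by_cases h : rd.length = 1 <;>
        simp [h, hN, String.append_assoc]

-- ===== VERDICT (by name: the statement is the Claim_ definition above) =====
theorem render_graph_spec : Claim_equal_render_graph := by
  intro g _
  show render_graph g = render_graph_alt g
  have hH : ("digraph {\nrankdir = LR;\nedge [arrowhead=none];\nnode [shape=box];\n\n" : String)
      = "digraph {\n" ++ ("rankdir = LR;\n" ++ ("edge [arrowhead=none];\n" ++ "node [shape=box];\n\n")) := rfl
  simp [render_graph, render_graph_alt, altRoundLoop_eq, hH, String.append_assoc]
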